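-- pv_equiv track=rewrite | github.com/huntercasillas/418 | Lab 35 - Cyclopeptide Leaderboard/cyclopeptideLeaderboard.py | linear_spectrum
-- ===== SOURCE A (Python) =====
-- def linear_spectrum(amino_acids):
--     n = len(amino_acids)
--     PrefixMass = [0]
--     for i in range(n):
--         PrefixMass.append(PrefixMass[i] + amino_acids[i])
--     lSpectrum = [0]
--     for i in range(n):
--         for j in range(i + 1, n + 1):
--             lSpectrum.append(PrefixMass[j] - PrefixMass[i])
--     currspectrum_dict = dict()
--     for s in lSpectrum:
--         currspectrum_dict[s] = currspectrum_dict.get(s, 0) + 1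
--     return currspectrum_dict
-- ===== SOURCE B (Python) =====
-- def linear_spectrum(amino_acids):
--     # Count subpeptide masses directly with a running sum per start index;
--     # no PrefixMass table, no intermediate lSpectrum list.
--     counts = {0: 1}
--     n = len(amino_acids)
--     for i in range(n):
--         running = 0
--         for j in range(i, n):
--             running += amino_acids[j]
--             counts[running] = counts.get(running, 0) + 1
--     return counts
-- ===== Notes on version B (the rewrite author's own statement) =====
-- stated objective: simpler
-- what changed: B drops A's PrefixMass table and intermediate lSpectrum list, counting each linear-subpeptide mass directly into the dict with a running sum per start index, starting the counter at {0: 1}.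
import Mathlib
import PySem

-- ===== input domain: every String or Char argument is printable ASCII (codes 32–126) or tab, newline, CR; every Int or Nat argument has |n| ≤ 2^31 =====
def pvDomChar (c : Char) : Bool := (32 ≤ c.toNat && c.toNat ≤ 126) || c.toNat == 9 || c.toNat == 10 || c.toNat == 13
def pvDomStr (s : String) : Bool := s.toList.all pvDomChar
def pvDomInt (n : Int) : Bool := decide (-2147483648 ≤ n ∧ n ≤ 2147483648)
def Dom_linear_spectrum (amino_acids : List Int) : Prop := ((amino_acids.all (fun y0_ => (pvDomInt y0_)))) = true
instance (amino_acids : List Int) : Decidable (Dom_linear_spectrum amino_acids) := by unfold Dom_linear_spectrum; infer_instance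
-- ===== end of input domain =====

-- B replaces A's PrefixMass table and intermediate lSpectrum list by counting subpeptide
-- masses directly into the dict with a running sum per start index (simpler decomposition).

-- ===== PORT A =====
def linear_spectrum (amino_acids : List Int) : List (Int × Int) :=
  let n : Int := amino_acids.length
  let PrefixMass : List Int :=
    (PySem.List.pyRange 0 n 1).foldl
      (fun PM i => PM ++ [PySem.List.pyGetD PM i 0 + PySem.List.pyGetD amino_acids i 0]) [0]
  let lSpectrum : List Int :=
    (PySem.List.pyRange 0 n 1).foldl
      (fun ls i =>
        (PySem.List.pyRange (i + 1) (n + 1) 1).foldl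
          (fun ls j => ls ++ [PySem.List.pyGetD PrefixMass j 0 - PySem.List.pyGetD PrefixMass i 0]) ls)
      [0]
  (lSpectrum.foldl (fun d s => d.insert s (d.getD s 0 + 1)) PySem.Dict.empty).items

-- ===== PORT B =====
def linear_spectrum_alt (amino_acids : List Int) : List (Int × Int) :=
  let n : Int := amino_acids.length
  let counts : PySem.Dict Int Int :=
    (PySem.List.pyRange 0 n 1).foldl
      (fun counts i =>
        ((PySem.List.pyRange i n 1).foldl
          (fun (p : Int × PySem.Dict Int Int) j =>
            (p.1 + PySem.List.pyGetD amino_acids j 0,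
             p.2.insert (p.1 + PySem.List.pyGetD amino_acids j 0)
               (p.2.getD (p.1 + PySem.List.pyGetD amino_acids j 0) 0 + 1)))
          ((0 : Int), counts)).2)
      (PySem.Dict.empty.insert 0 1)
  counts.items

-- ===== PRECONDITION & SPEC =====
def Spec_linear_spectrum (amino_acids : List Int) (out : List (Int × Int)) : Prop := out = linear_spectrum_alt amino_acids
instance (amino_acids : List Int) (out : List (Int × Int)) : Decidable (Spec_linear_spectrum amino_acids out) := by unfold Spec_linear_spectrum; infer_instance

-- ===== CLAIM (what is proved, stated in full; the proofs are below) =====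
def Claim_equal_linear_spectrum : Prop := ∀ (amino_acids : List Int), Dom_linear_spectrum amino_acids → Spec_linear_spectrum amino_acids (linear_spectrum amino_acids)

-- ===== LEMMAS AND PROOFS =====

-- The prefix-sum table A builds, in closed form.
def pvPM (aa : List Int) : List Int := (List.range (aa.length + 1)).map (fun k => (aa.take k).sum)

-- The per-mass dict update both programs perform.
def pvUpd (d : PySem.Dict Int Int) (s : Int) : PySem.Dict Int Int := d.insert s (d.getD s 0 + 1)

lemma pvPM_get (aa : List Int) (j : Int) (h0 : 0 ≤ j) (h1 : j ≤ (aa.length : Int)) :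
    PySem.List.pyGetD (pvPM aa) j 0 = (aa.take j.toNat).sum := by
  rw [PySem.List.pyGetD_eq_getElem (pvPM aa) 0 h0 (by simp [pvPM]; omega)]
  simp [pvPM]

-- A's PrefixMass loop computes pvPM.
lemma pvPM_eq (aa : List Int) (c : Nat) (hc : c ≤ aa.length) :
    (PySem.List.pyRange 0 (c : Int) 1).foldl
      (fun PM i => PM ++ [PySem.List.pyGetD PM i 0 + PySem.List.pyGetD aa i 0]) [0]
    = (List.range (c + 1)).map (fun k => (aa.take k).sum) := by
  induction c with
  | zero => simp [PySem.List.pyRange_one_eq_nil]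
  | succ m ih =>
    have hm : (m : Int) ≤ aa.length := by exact_mod_cast Nat.le_of_succ_le hc
    have : ((m + 1 : Nat) : Int) = (m : Int) + 1 := by push_cast; ring
    rw [this, PySem.List.pyRange_one_succ_right (by positivity), List.foldl_append,
      ih (Nat.le_of_succ_le hc)]
    have hg : PySem.List.pyGetD ((List.range (m + 1)).map (fun k => (aa.take k).sum)) (m : Int) 0
        = (aa.take m).sum := by
      rw [PySem.List.pyGetD_natCast]
      simp
    have ha : PySem.List.pyGetD aa (m : Int) 0 = aa[m]'(by omega) := by
      rw [PySem.List.pyGetD_natCast]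
      simp [List.getD_eq_getElem?_getD, List.getElem?_eq_getElem (by omega : m < aa.length)]
    simp only [List.foldl_cons, List.foldl_nil, hg, ha]
    rw [List.range_succ (n := m + 1), List.map_append]
    simp [List.sum_take_succ aa m (by omega)]

-- B's inner loop, started at index j with running value (take j).sum + b, folds pvUpd
-- over the masses (take k).sum + b for k = j+1 .. n.
lemma pvInner_eq (aa : List Int) (b : Int) (j : Nat) (hj : j ≤ aa.length)
    (d : PySem.Dict Int Int) :
    ((PySem.List.pyRange (j : Int) (aa.length : Int) 1).foldl
      (fun (p : Int × PySem.Dict Int Int) k =>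
        (p.1 + PySem.List.pyGetD aa k 0,
         p.2.insert (p.1 + PySem.List.pyGetD aa k 0)
           (p.2.getD (p.1 + PySem.List.pyGetD aa k 0) 0 + 1)))
      ((aa.take j).sum + b, d)).2
    = ((PySem.List.pyRange ((j : Int) + 1) ((aa.length : Int) + 1) 1).map
        (fun k => (aa.take k.toNat).sum + b)).foldl pvUpd d := by
  induction hn : aa.length - j generalizing j d with
  | zero =>
    have hj' : j = aa.length := by omega
    subst hj'
    rw [PySem.List.pyRange_one_eq_nil le_rfl, PySem.List.pyRange_one_eq_nil (by omega)]
    simp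
  | succ m ih =>
    have hjlt : j < aa.length := by omega
    rw [PySem.List.pyRange_one_cons (show (j : Int) < (aa.length : Int) by exact_mod_cast hjlt)]
    have ha : PySem.List.pyGetD aa (j : Int) 0 = aa[j]'hjlt := by
      rw [PySem.List.pyGetD_natCast]
      simp [List.getD_eq_getElem?_getD, List.getElem?_eq_getElem hjlt]
    simp only [List.foldl_cons, ha]
    rw [show (aa.take j).sum + b + aa[j]'hjlt = (aa.take (j + 1)).sum + b from by
      rw [List.sum_take_succ aa j hjlt]; ring]
    rw [PySem.List.pyRange_one_cons (show (j : Int) + 1 < (aa.length : Int) + 1 by omega)]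
    simp only [List.map_cons, List.foldl_cons]
    rw [show ((j : Int) + 1).toNat = j + 1 from by omega]
    rw [show ((j : Int) + 1) = ((j + 1 : Nat) : Int) from by simp]
    rw [ih (j + 1) (by omega) _ (by omega)]
    rfl

-- B's outer loop from start index i equals folding pvUpd over A's (i,j)-ordered masses.
lemma pvOuter_eq (aa : List Int) (i : Nat) (hi : i ≤ aa.length) (d : PySem.Dict Int Int) :
    (PySem.List.pyRange (i : Int) (aa.length : Int) 1).foldl
      (fun counts i =>
        ((PySem.List.pyRange i (aa.length : Int) 1).foldl
          (fun (p : Int × PySem.Dict Int Int) j =>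
            (p.1 + PySem.List.pyGetD aa j 0,
             p.2.insert (p.1 + PySem.List.pyGetD aa j 0)
               (p.2.getD (p.1 + PySem.List.pyGetD aa j 0) 0 + 1)))
          ((0 : Int), counts)).2) d
    = ((PySem.List.pyRange (i : Int) (aa.length : Int) 1).flatMap
        (fun i => (PySem.List.pyRange (i + 1) ((aa.length : Int) + 1) 1).map
          (fun j => PySem.List.pyGetD (pvPM aa) j 0 - PySem.List.pyGetD (pvPM aa) i 0))).foldl
        pvUpd d := by
  induction hn : aa.length - i generalizing i d with
  | zero =>
    have hi' : i = aa.length := by omega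
    subst hi'
    rw [PySem.List.pyRange_one_eq_nil le_rfl]
    simp
  | succ m ih =>
    have hilt : i < aa.length := by omega
    rw [PySem.List.pyRange_one_cons (show (i : Int) < (aa.length : Int) by exact_mod_cast hilt)]
    simp only [List.foldl_cons, List.flatMap_cons, List.foldl_append]
    have hinner := pvInner_eq aa (-(aa.take i).sum) i (by omega) d
    rw [show (aa.take i).sum + -(aa.take i).sum = (0 : Int) from by ring] at hinner
    rw [hinner]
    have hmapeq :
        (PySem.List.pyRange ((i : Int) + 1) ((aa.length : Int) + 1) 1).map
          (fun j => PySem.List.pyGetD (pvPM aa) j 0 - PySem.List.pyGetD (pvPM aa) (i : Int) 0)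
        = (PySem.List.pyRange ((i : Int) + 1) ((aa.length : Int) + 1) 1).map
          (fun k => (aa.take k.toNat).sum + (-(aa.take i).sum)) := by
      apply List.map_congr_left
      intro j hjmem
      rw [PySem.List.mem_pyRange_one] at hjmem
      rw [pvPM_get aa j (by omega) (by omega), pvPM_get aa (i : Int) (by omega) (by omega)]
      simp
      omega
    rw [hmapeq]
    rw [show ((i : Int) + 1) = ((i + 1 : Nat) : Int) from by simp]
    rw [ih (i + 1) (by omega) _ (by omega)]

-- ===== VERDICT (by name: the statement is the Claim_ definition above) =====
theorem linear_spectrum_spec : Claim_equal_linear_spectrum := by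
  intro aa _
  show linear_spectrum aa = linear_spectrum_alt aa
  simp only [linear_spectrum, linear_spectrum_alt]
  rw [pvPM_eq aa aa.length le_rfl]
  rw [show (List.range (aa.length + 1)).map (fun k => (aa.take k).sum) = pvPM aa from rfl]
  simp only [PySem.List.foldl_append_singleton_eq_map, PySem.List.foldl_append_eq_flatMap]
  have houter := pvOuter_eq aa 0 (Nat.zero_le _) (PySem.Dict.empty.insert 0 1)
  rw [Nat.cast_zero] at houter
  rw [houter, List.foldl_append]
  simp only [List.foldl_cons, List.foldl_nil, PySem.Dict.getD_empty, zero_add]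
  rfl
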